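-- pv_equiv track=rewrite | github.com/VladKha/CodeWars | 7 kyu/Comfortable words/solve.py | comfortable_word
-- ===== SOURCE A (Python) =====
-- def comfortable_word(word):
--     left = 'qwertasdfgzxcvb'
--     right = 'yuiophjklnm'
--     n = len(word)
--
--     start_left = word[0] in left
--     if start_left:
--         return all(word[i] in left for i in range(0, n, 2)) and all(word[i] in right for i in range(1, n, 2))
--     else:
--         return all(word[i] in right for i in range(0, n, 2)) and all(word[i] in left for i in range(1, n, 2))
-- ===== SOURCE B (Python) =====
-- def comfortable_word(word):
--     left = set('qwertasdfgzxcvb')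
--     right = set('yuiophjklnm')
--     return all(c in left or c in right for c in word) and all(
--         (a in left) != (b in left) for a, b in zip(word, word[1:]))
-- ===== Notes on version B (the rewrite author's own statement) =====
-- stated objective: simpler
-- what changed: Instead of splitting indices by parity into two all()-scans keyed to the half of word[0], B makes one membership pass plus one zip pass checking that each adjacent pair lies on opposite halves.
import Mathlib
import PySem

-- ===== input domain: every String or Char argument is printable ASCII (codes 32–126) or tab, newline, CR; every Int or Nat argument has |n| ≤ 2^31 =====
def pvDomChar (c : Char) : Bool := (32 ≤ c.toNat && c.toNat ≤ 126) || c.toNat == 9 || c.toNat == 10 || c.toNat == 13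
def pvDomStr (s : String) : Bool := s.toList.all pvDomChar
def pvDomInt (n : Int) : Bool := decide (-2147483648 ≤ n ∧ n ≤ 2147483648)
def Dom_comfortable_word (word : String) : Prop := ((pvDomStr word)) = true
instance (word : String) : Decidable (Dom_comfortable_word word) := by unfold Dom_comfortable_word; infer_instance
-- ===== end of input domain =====

-- B replaces A's two parity-indexed scans (keyed to word[0]'s half) by one membership pass
-- plus one adjacent-pairs pass; same cost, simpler decomposition.

-- The two keyboard halves, as the character lists of A's string literals
-- ('c in left' on a 1-char c is char-in-string membership).
def leftChars : List Char := ['q','w','e','r','t','a','s','d','f','g','z','x','c','v','b']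
def rightChars : List Char := ['y','u','i','o','p','h','j','k','l','n','m']

-- ===== PORT A =====
def comfortable_word (word : String) : Bool :=
  let n : Int := PySem.Str.len word
  let start_left : Bool :=            -- word[0] in left  (word[0] raises on "": excluded by Pre_)
    match PySem.Str.pyGet? word 0 with
    | some c => leftChars.contains c
    | none => false
  if start_left then
    ((PySem.List.pyRange 0 n 2).all (fun i =>
        match PySem.Str.pyGet? word i with
        | some c => leftChars.contains c
        | none => false)) &&
    ((PySem.List.pyRange 1 n 2).all (fun i =>
        match PySem.Str.pyGet? word i with
        | some c => rightChars.contains c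
        | none => false))
  else
    ((PySem.List.pyRange 0 n 2).all (fun i =>
        match PySem.Str.pyGet? word i with
        | some c => rightChars.contains c
        | none => false)) &&
    ((PySem.List.pyRange 1 n 2).all (fun i =>
        match PySem.Str.pyGet? word i with
        | some c => leftChars.contains c
        | none => false))

-- ===== PORT B =====
def comfortable_word_alt (word : String) : Bool :=
  let cs := word.toList
  cs.all (fun c => leftChars.contains c || rightChars.contains c) &&
  (cs.zip cs.tail).all (fun p => (leftChars.contains p.1) != (leftChars.contains p.2))

-- ===== PRECONDITION & SPEC =====
-- Pre_ excludes only the empty string, where A's word[0] raises IndexError.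
def Pre_comfortable_word (word : String) : Prop := word.toList ≠ []
instance (word : String) : Decidable (Pre_comfortable_word word) := by unfold Pre_comfortable_word; infer_instance
def pvWitness_comfortable_word : String := "qhql"

def Spec_comfortable_word (word : String) (out : Bool) : Prop := out = comfortable_word_alt word
instance (word : String) (out : Bool) : Decidable (Spec_comfortable_word word out) := by unfold Spec_comfortable_word; infer_instance

-- ===== CLAIM (what is proved, stated in full; the proofs are below) =====
def Claim_equal_comfortable_word : Prop := ∀ (word : String), Dom_comfortable_word word → Pre_comfortable_word word → Spec_comfortable_word word (comfortable_word word)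

-- ===== LEMMAS AND PROOFS =====

-- the characters at even positions of a list
def evens : List Char → List Char
  | [] => []
  | [c] => [c]
  | c :: _ :: rest => c :: evens rest

-- expected alternation: b says whether the next char must be on the left half
def okAlt : Bool → List Char → Bool
  | _, [] => true
  | b, c :: rest => (if b then leftChars.contains c else rightChars.contains c) && okAlt (!b) rest

theorem left_right_disjoint (c : Char) (h : leftChars.contains c = true) :
    rightChars.contains c = false := by
  simp only [leftChars, List.contains_eq_mem, decide_eq_true_eq, List.mem_cons,
    List.not_mem_nil, or_false] at h
  simp only [rightChars, List.contains_eq_mem, decide_eq_false_iff_not, List.mem_cons,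
    List.not_mem_nil, or_false]
  rcases h with rfl|rfl|rfl|rfl|rfl|rfl|rfl|rfl|rfl|rfl|rfl|rfl|rfl|rfl|rfl <;> decide

theorem evens_getElem? (cs : List Char) (k : Nat) : (evens cs)[k]? = cs[2 * k]? := by
  induction cs using evens.induct generalizing k with
  | case1 => simp [evens]
  | case2 c =>
    match k with
    | 0 => simp [evens]
    | k + 1 => simp [evens]
  | case3 c d rest ih =>
    match k with
    | 0 => simp [evens]
    | k + 1 =>
      show (evens rest)[k]? = (c :: d :: rest)[2 * (k + 1)]?
      rw [ih k]
      have : 2 * (k + 1) = (2 * k) + 1 + 1 := by omega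
      rw [this]
      simp

theorem evens_length (cs : List Char) : (evens cs).length = (cs.length + 1) / 2 := by
  induction cs using evens.induct with
  | case1 => simp [evens]
  | case2 c => simp [evens]
  | case3 c d rest ih => simp [evens, ih]; omega

-- all over List.range of the length, indexed, equals List.all
theorem all_range_getElem? (l : List Char) (P : Char → Bool) :
    (List.range l.length).all (fun k => (l[k]?.map P).getD false) = l.all P := by
  induction l with
  | nil => simp
  | cons c rest ih =>
    rw [show (c :: rest).length = rest.length + 1 from rfl, List.range_succ_eq_map]
    simp only [List.all_cons, List.all_map, Function.comp_def, List.getElem?_cons_succ,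
      List.getElem?_cons_zero, Option.map_some, Option.getD_some]
    rw [ih]

-- A's range(s, n, 2) scan over word equals a plain List.all over evens (drop s)
theorem range2_all (w : String) (s : Nat) (P : Char → Bool) :
    ((PySem.List.pyRange (s : Int) (PySem.Str.len w) 2).all (fun i =>
        match PySem.Str.pyGet? w i with
        | some c => P c
        | none => false))
      = (evens (w.toList.drop s)).all P := by
  have hmatch : ∀ i : Int, (match PySem.Str.pyGet? w i with
      | some c => P c
      | none => false) = ((PySem.Str.pyGet? w i).map P).getD false := by
    intro i; cases PySem.Str.pyGet? w i <;> rfl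
  rw [PySem.List.pyRange_of_pos _ _ (by norm_num : (0:Int) < 2)]
  rw [List.all_map]
  set cs := w.toList with hcs
  have hlen : PySem.Str.len w = (cs.length : Int) := by simp [PySem.Str.len_eq, hcs]
  have hcount : (if (s : Int) < PySem.Str.len w
      then ((PySem.Str.len w - (s : Int) + 2 - 1) / 2).toNat else 0)
      = (evens (cs.drop s)).length := by
    rw [hlen, evens_length, List.length_drop]
    split_ifs with h
    · omega
    · omega
  rw [hcount, ← all_range_getElem?]
  refine List.all_congr rfl (fun k => ?_)
  simp only [Function.comp_apply]
  rw [hmatch]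
  have hcast : (s : Int) + 2 * (k : Int) = ((s + 2 * k : Nat) : Int) := by push_cast; ring
  rw [hcast, PySem.Str.pyGet?_natCast]
  rw [evens_getElem?, List.getElem?_drop, ← hcs]

-- okAlt splits into the two parity scans
theorem okAlt_eq_evens (cs : List Char) (b : Bool) :
    okAlt b cs = ((evens cs).all (fun c => if b then leftChars.contains c else rightChars.contains c)
      && (evens cs.tail).all (fun c => if b then rightChars.contains c else leftChars.contains c)) := by
  induction cs using evens.induct generalizing b with
  | case1 => simp [okAlt, evens]
  | case2 c => cases b <;> simp [okAlt, evens]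
  | case3 c d rest ih =>
    show okAlt b (c :: d :: rest) = _
    rw [show okAlt b (c :: d :: rest)
        = ((if b then leftChars.contains c else rightChars.contains c)
          && ((if (!b) then leftChars.contains d else rightChars.contains d) && okAlt b rest)) from by
      simp [okAlt]]
    rw [ih b]
    show _ = ((evens (c :: d :: rest)).all _ && (evens (d :: rest)).all _)
    rw [show evens (c :: d :: rest) = c :: evens rest from rfl,
        show evens (d :: rest) = d :: evens rest.tail from by
          cases rest <;> rfl]
    cases b <;> simp only [Bool.not_true, Bool.not_false,
        List.all_cons, Bool.false_eq_true, ↓reduceIte] <;>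
      simp only [← Bool.and_assoc] <;> ac_rfl

-- B's two passes equal okAlt keyed to the head's half
theorem B_eq_okAlt (rest : List Char) (c : Char) :
    (((c :: rest).all (fun x => leftChars.contains x || rightChars.contains x))
      && (((c :: rest).zip rest).all (fun p => (leftChars.contains p.1) != (leftChars.contains p.2))))
      = okAlt (leftChars.contains c) (c :: rest) := by
  induction rest generalizing c with
  | nil =>
    cases h : leftChars.contains c <;>
      simp only [okAlt, h, List.all_cons, List.all_nil, List.zip_nil_right, Bool.and_true,
        Bool.true_or, Bool.false_or, ↓reduceIte, Bool.false_eq_true, Bool.true_and]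
  | cons d rest' ih =>
    rw [show ((c :: d :: rest').zip (d :: rest')) = (c, d) :: ((d :: rest').zip rest') from rfl]
    rw [show okAlt (leftChars.contains c) (c :: d :: rest')
        = ((if leftChars.contains c then leftChars.contains c else rightChars.contains c)
          && okAlt (!(leftChars.contains c)) (d :: rest')) from rfl]
    simp only [List.all_cons]
    have hstep := ih d
    simp only [List.all_cons] at hstep
    cases hc : leftChars.contains c with
    | true =>
      cases hd : leftChars.contains d with
      | true =>
        have hfalse : okAlt false (d :: rest') = false := by
          simp only [okAlt, left_right_disjoint d hd, Bool.false_eq_true, ↓reduceIte,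
            Bool.false_and]
        simp [hc, hd, hfalse]
      | false =>
        rw [hd] at hstep
        simp only [Bool.false_or] at hstep
        simp only [hc, hd, Bool.true_or, Bool.false_or, Bool.not_true, ↓reduceIte,
          Bool.true_bne, Bool.not_false, Bool.true_and]
        exact hstep
    | false =>
      cases hd : leftChars.contains d with
      | true =>
        rw [hd] at hstep
        simp only [Bool.true_or, Bool.true_and] at hstep
        simp only [hc, hd, Bool.false_or, Bool.true_or, Bool.true_and, Bool.not_false,
          ↓reduceIte, Bool.false_eq_true, Bool.false_bne, Bool.not_true]
        rw [← hstep, ← Bool.and_assoc]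
      | false =>
        have hfalse : okAlt true (d :: rest') = false := by
          simp only [okAlt, hd, ↓reduceIte, Bool.false_and]
        simp [hc, hd, hfalse]

-- ===== VERDICT (by name: the statement is the Claim_ definition above) =====
theorem comfortable_word_spec : Claim_equal_comfortable_word := by
  intro word _ hpre
  unfold Spec_comfortable_word
  unfold Pre_comfortable_word at hpre
  obtain ⟨c, rest, hcs⟩ : ∃ c rest, word.toList = c :: rest := by
    cases h : word.toList with
    | nil => exact absurd h hpre
    | cons c rest => exact ⟨c, rest, rfl⟩
  have hget0 : PySem.Str.pyGet? word 0 = some c := by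
    have h := PySem.Str.pyGet?_natCast word 0
    simp only [Nat.cast_zero] at h
    rw [h, hcs]; rfl
  have h0L := range2_all word 0 (fun x => leftChars.contains x)
  have h0R := range2_all word 0 (fun x => rightChars.contains x)
  have h1L := range2_all word 1 (fun x => leftChars.contains x)
  have h1R := range2_all word 1 (fun x => rightChars.contains x)
  simp only [Nat.cast_zero, Nat.cast_one, hcs, List.drop_zero, List.drop_succ_cons]
    at h0L h0R h1L h1R
  unfold comfortable_word comfortable_word_alt
  simp only [hget0, hcs, List.tail_cons]
  rw [h0L, h0R, h1L, h1R, B_eq_okAlt, okAlt_eq_evens, List.tail_cons]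
  cases hc : leftChars.contains c <;> simp [hc]
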